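-- pv_equiv track=rewrite | github.com/PhoeniksReMa/MirOptStats | djangoapp/ozon/legacy_scripts/007.FBO_Upravlenie_stocks_28.py | _dedupe_cluster_sets
-- ===== SOURCE A (Python) =====
-- from typing import List, Dict, Optional, Tuple
--
-- def _dedupe_cluster_sets(cluster_ids_map: Dict[str, Optional[List[int]]]) -> Dict[Tuple[int, ...], List[str]]:
--     groups: Dict[Tuple[int, ...], List[str]] = {}
--     for col, ids in cluster_ids_map.items():
--         if not ids:
--             continue
--         key = tuple(ids)
--         groups.setdefault(key, []).append(col)
--     return groups
-- ===== SOURCE B (Python) =====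
-- def _dedupe_cluster_sets(cluster_ids_map):
--     items = [(tuple(ids), col) for col, ids in cluster_ids_map.items() if ids]
--     keys = list(dict.fromkeys(k for k, _ in items))
--     return {k: [c for kk, c in items if kk == k] for k in keys}
-- ===== Notes on version B (the rewrite author's own statement) =====
-- stated objective: alternative
-- what changed: Replaces the single-pass dict-with-setdefault accumulation by a two-phase plan: filter to (key, col) pairs, dedupe the keys in first-occurrence order, then collect each group's columns with a per-key comprehension scan.
import Mathlib
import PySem

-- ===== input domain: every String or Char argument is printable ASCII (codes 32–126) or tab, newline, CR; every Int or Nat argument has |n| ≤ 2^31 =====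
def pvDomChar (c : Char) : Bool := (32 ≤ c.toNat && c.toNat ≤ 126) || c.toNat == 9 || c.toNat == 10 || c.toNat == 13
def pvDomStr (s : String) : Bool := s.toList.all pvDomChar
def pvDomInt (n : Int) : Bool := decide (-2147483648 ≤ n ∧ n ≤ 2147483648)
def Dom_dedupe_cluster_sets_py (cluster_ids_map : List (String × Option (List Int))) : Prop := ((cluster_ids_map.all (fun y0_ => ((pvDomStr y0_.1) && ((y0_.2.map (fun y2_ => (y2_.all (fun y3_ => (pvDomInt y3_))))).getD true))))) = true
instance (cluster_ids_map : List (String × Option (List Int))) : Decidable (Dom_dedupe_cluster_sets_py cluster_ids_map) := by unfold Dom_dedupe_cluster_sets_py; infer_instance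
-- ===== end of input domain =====

-- B groups columns by key in two phases (filter to pairs, dedupe keys, per-key scan)
-- instead of A's single-pass dict accumulation with setdefault; same cost class, alternative structure.

-- 'if not ids: continue' — key of a falsy ids value (None or []) is none
def pvKeyOf (ids : Option (List Int)) : Option (List Int) :=
  match ids with
  | none => none
  | some l => if l = [] then none else some l

-- ===== PORT A =====
-- groups.setdefault(key, []).append(col): append col to the entry with this key,
-- or add a fresh (key, [col]) entry at the end (dict insertion order)
def pvSetdefaultAppend : List (List Int × List String) → List Int → String → List (List Int × List String)
  | [], k, c => [(k, [c])]
  | (k', v) :: rest, k, c =>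
      if k' = k then (k', v ++ [c]) :: rest else (k', v) :: pvSetdefaultAppend rest k c

def dedupe_cluster_sets_py (cluster_ids_map : List (String × Option (List Int))) : List (List Int × List String) :=
  cluster_ids_map.foldl
    (fun groups p =>
      match pvKeyOf p.2 with
      | none => groups
      | some k => pvSetdefaultAppend groups k p.1)
    []

-- ===== PORT B =====
def dedupe_cluster_sets_py_alt (cluster_ids_map : List (String × Option (List Int))) : List (List Int × List String) :=
  -- items = [(tuple(ids), col) for col, ids in cluster_ids_map.items() if ids]
  let items := cluster_ids_map.filterMap (fun p => (pvKeyOf p.2).map (fun k => (k, p.1)))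
  -- keys = list(dict.fromkeys(k for k, _ in items))
  let keys := PySem.List.dedup (items.map Prod.fst)
  -- {k: [c for kk, c in items if kk == k] for k in keys}
  keys.map (fun k => (k, items.filterMap (fun q => if q.1 = k then some q.2 else none)))

-- ===== PRECONDITION & SPEC =====
def Spec_dedupe_cluster_sets_py (cluster_ids_map : List (String × Option (List Int))) (out : List (List Int × List String)) : Prop := out = dedupe_cluster_sets_py_alt cluster_ids_map
instance (cluster_ids_map : List (String × Option (List Int))) (out : List (List Int × List String)) : Decidable (Spec_dedupe_cluster_sets_py cluster_ids_map out) := by unfold Spec_dedupe_cluster_sets_py; infer_instance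

-- ===== CLAIM (what is proved, stated in full; the proofs are below) =====
def Claim_equal_dedupe_cluster_sets_py : Prop := ∀ (cluster_ids_map : List (String × Option (List Int))), Dom_dedupe_cluster_sets_py cluster_ids_map → Spec_dedupe_cluster_sets_py cluster_ids_map (dedupe_cluster_sets_py cluster_ids_map)

-- ===== LEMMAS AND PROOFS =====

-- columns of ps whose key is k
def pvColsP (k : List Int) (ps : List (List Int × String)) : List String :=
  ps.filterMap (fun q => if q.1 = k then some q.2 else none)

-- the keys of ps not in seen, first occurrences in order
def pvKeysP (seen : List (List Int)) : List (List Int × String) → List (List Int)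
  | [] => []
  | (k, _) :: ps => if k ∈ seen then pvKeysP seen ps else k :: pvKeysP (seen ++ [k]) ps

theorem pvColsP_cons (k : List Int) (c : String) (q : List Int) (ps : List (List Int × String)) :
    pvColsP q ((k, c) :: ps) = if k = q then c :: pvColsP q ps else pvColsP q ps := by
  by_cases h : k = q <;> simp [pvColsP, h]

theorem pvKeysP_not_mem (seen : List (List Int)) (ps : List (List Int × String))
    (k : List Int) (h : k ∈ pvKeysP seen ps) : k ∉ seen := by
  induction ps generalizing seen with
  | nil => simp [pvKeysP] at h
  | cons q ps ih =>
    obtain ⟨kq, cq⟩ := q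
    simp only [pvKeysP] at h
    split_ifs at h with hm
    · exact ih seen h
    · rcases List.mem_cons.1 h with rfl | h
      · exact hm
      · have := ih _ h
        intro hk; exact this (List.mem_append_left _ hk)

theorem pvSda_of_not_mem (g : List (List Int × List String)) (k : List Int) (c : String)
    (h : k ∉ g.map Prod.fst) : pvSetdefaultAppend g k c = g ++ [(k, [c])] := by
  induction g with
  | nil => rfl
  | cons e g ih =>
    obtain ⟨ke, ve⟩ := e
    simp only [List.map_cons, List.mem_cons] at h
    rw [not_or] at h
    simp [pvSetdefaultAppend, Ne.symm h.1, ih h.2]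

theorem pvSda_map_fst_of_mem (g : List (List Int × List String)) (k : List Int) (c : String)
    (h : k ∈ g.map Prod.fst) : (pvSetdefaultAppend g k c).map Prod.fst = g.map Prod.fst := by
  induction g with
  | nil => simp at h
  | cons e g ih =>
    obtain ⟨ke, ve⟩ := e
    by_cases hk : ke = k
    · simp [pvSetdefaultAppend, hk]
    · simp only [List.map_cons, List.mem_cons] at h
      rcases h with h | h
      · exact absurd h.symm hk
      · simp [pvSetdefaultAppend, hk, ih h]

theorem pvSda_map_of_mem (g : List (List Int × List String)) (k : List Int) (c : String)
    (ps : List (List Int × String))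
    (h : k ∈ g.map Prod.fst) (hnd : (g.map Prod.fst).Nodup) :
    (pvSetdefaultAppend g k c).map (fun e => (e.1, e.2 ++ pvColsP e.1 ps)) =
      g.map (fun e => (e.1, e.2 ++ pvColsP e.1 ((k, c) :: ps))) := by
  induction g with
  | nil => simp at h
  | cons e g ih =>
    obtain ⟨ke, ve⟩ := e
    simp only [List.map_cons, List.nodup_cons] at hnd
    by_cases hk : ke = k
    · subst hk
      simp only [pvSetdefaultAppend, if_true, List.map_cons]
      refine congrArg₂ List.cons ?_ ?_
      · rw [pvColsP_cons, if_pos rfl, List.append_assoc]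
        rfl
      · apply List.map_congr_left
        intro e he
        have hne : ke ≠ e.1 := by
          intro hkk
          exact hnd.1 (hkk ▸ List.mem_map.2 ⟨e, he, rfl⟩)
        rw [pvColsP_cons, if_neg hne]
    · simp only [List.map_cons, List.mem_cons] at h
      rcases h with h | h
      · exact absurd h.symm hk
      · simp only [pvSetdefaultAppend, if_neg hk, List.map_cons]
        rw [ih h hnd.2]
        simp [pvColsP_cons, Ne.symm hk]

-- the main characterisation of A's fold
theorem pvFold_sda (ps : List (List Int × String)) :
    ∀ (g : List (List Int × List String)), (g.map Prod.fst).Nodup →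
      ps.foldl (fun g q => pvSetdefaultAppend g q.1 q.2) g =
        g.map (fun e => (e.1, e.2 ++ pvColsP e.1 ps)) ++
          (pvKeysP (g.map Prod.fst) ps).map (fun k => (k, pvColsP k ps)) := by
  induction ps with
  | nil => intro g _; simp [pvKeysP, pvColsP]
  | cons q ps ih =>
    intro g hnd
    obtain ⟨k, c⟩ := q
    simp only [List.foldl_cons]
    by_cases hm : k ∈ g.map Prod.fst
    · rw [ih _ (by rw [pvSda_map_fst_of_mem g k c hm]; exact hnd)]
      rw [pvSda_map_fst_of_mem g k c hm, pvSda_map_of_mem g k c ps hm hnd]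
      simp only [pvKeysP, if_pos hm]
      refine congrArg _ ?_
      apply List.map_congr_left
      intro k' hk'
      have hne : k ≠ k' := fun h => (pvKeysP_not_mem _ _ _ hk') (h ▸ hm)
      rw [pvColsP_cons, if_neg hne]
    · rw [pvSda_of_not_mem g k c hm]
      have hnd' : ((g ++ [(k, [c])]).map Prod.fst).Nodup := by
        rw [List.map_append]
        refine List.Nodup.append hnd (by simp) ?_
        intro a ha hb
        simp only [List.map_cons, List.map_nil, List.mem_singleton] at hb
        exact hm (hb ▸ ha)
      rw [ih _ hnd']
      simp only [List.map_append, List.map_cons, List.map_nil, pvKeysP, if_neg hm]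
      rw [List.append_assoc]
      refine congrArg₂ _ ?_ ?_
      · apply List.map_congr_left
        intro e he
        have : e.1 ≠ k := fun h => hm (h ▸ List.mem_map.2 ⟨e, he, rfl⟩)
        simp [pvColsP_cons, Ne.symm this]
      · simp only [pvColsP_cons, List.cons_append, List.nil_append]
        refine congrArg₂ _ (by simp) ?_
        apply List.map_congr_left
        intro k' hk'
        have : k' ∉ g.map Prod.fst ++ [k] := pvKeysP_not_mem _ _ _ hk'
        have hne : k ≠ k' := fun h => this (List.mem_append_right _ (by simp [h]))
        simp [hne]

-- A's fold over the raw map equals the pair-fold over the filtered items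
theorem pvFold_filter (m : List (String × Option (List Int))) :
    ∀ (g : List (List Int × List String)),
      m.foldl (fun groups p =>
          match pvKeyOf p.2 with
          | none => groups
          | some k => pvSetdefaultAppend groups k p.1) g =
        (m.filterMap (fun p => (pvKeyOf p.2).map (fun k => (k, p.1)))).foldl
          (fun g q => pvSetdefaultAppend g q.1 q.2) g := by
  induction m with
  | nil => intro g; rfl
  | cons p m ih =>
    intro g
    cases hk : pvKeyOf p.2 <;> simp [hk, ih]

-- dict.fromkeys-style dedup = pvKeysP with the seen prefix prepended
theorem pvDedup_keysP (ps : List (List Int × String)) :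
    ∀ (seen : List (List Int)),
      (ps.map Prod.fst).foldl PySem.Set.add seen = seen ++ pvKeysP seen ps := by
  induction ps with
  | nil => intro seen; simp [pvKeysP]
  | cons q ps ih =>
    intro seen
    obtain ⟨k, c⟩ := q
    simp only [List.map_cons, List.foldl_cons, pvKeysP]
    by_cases hm : k ∈ seen
    · rw [if_pos hm]
      have : PySem.Set.add seen k = seen := by
        simp [PySem.Set.add, PySem.Set.contains, hm]
      rw [this, ih]
    · rw [if_neg hm]
      have : PySem.Set.add seen k = seen ++ [k] := by
        simp [PySem.Set.add, PySem.Set.contains, hm]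
      rw [this, ih, List.append_assoc]
      rfl

-- ===== VERDICT (by name: the statement is the Claim_ definition above) =====
theorem dedupe_cluster_sets_py_spec : Claim_equal_dedupe_cluster_sets_py := by
  intro m _
  unfold Spec_dedupe_cluster_sets_py dedupe_cluster_sets_py
  rw [pvFold_filter m, pvFold_sda _ [] (by simp)]
  have halt : dedupe_cluster_sets_py_alt m =
      (PySem.List.dedup ((m.filterMap (fun p => (pvKeyOf p.2).map (fun k => (k, p.1)))).map Prod.fst)).map
        (fun k => (k, pvColsP k (m.filterMap (fun p => (pvKeyOf p.2).map (fun k => (k, p.1)))))) := rfl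
  have hd : PySem.List.dedup ((m.filterMap (fun p => (pvKeyOf p.2).map (fun k => (k, p.1)))).map Prod.fst)
      = pvKeysP [] (m.filterMap (fun p => (pvKeyOf p.2).map (fun k => (k, p.1)))) := by
    rw [PySem.List.dedup_eq_ofList, PySem.Set.ofList_eq_foldl, pvDedup_keysP]
    rfl
  rw [halt, hd]
  simp
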